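-- pv_equiv track=rewrite | github.com/leesumin7766/codingex | 프로그래머스/1/42862. 체육복/체육복.py | solution
-- ===== SOURCE A (Python) =====
-- def solution(n, lost, reserve):
--     # 여벌 체육복이 있지만 도난당한 학생 제거
--     lost_set = set(lost) - set(reserve)
--     reserve_set = set(reserve) - set(lost)
--
--     for student in sorted(lost_set):
--         if student - 1 in reserve_set:
--             reserve_set.remove(student - 1)
--         elif student + 1 in reserve_set:
--             reserve_set.remove(student + 1)
--         else:
--             continue
--
--         lost_set.remove(student)
--
--     return n - len(lost_set)
-- ===== SOURCE B (Python) =====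
-- def solution(n, lost, reserve):
--     # Two-pointer merge over the two sorted (deduplicated, overlap-cancelled) lists.
--     L = sorted(set(lost) - set(reserve))
--     R = sorted(set(reserve) - set(lost))
--     i = j = 0
--     unmatched = 0
--     while i < len(L):
--         if j == len(R):
--             unmatched += 1
--             i += 1
--         elif R[j] < L[i] - 1:
--             j += 1
--         elif R[j] <= L[i] + 1:
--             i += 1
--             j += 1
--         else:
--             unmatched += 1
--             i += 1
--     return n - unmatched
-- ===== Notes on version B (the rewrite author's own statement) =====
-- stated objective: alternative
-- what changed: Replaces A's per-lost-student set-membership lookups and set mutations with a single two-pointer merge over the two sorted deduplicated lists, maintaining only two indices and an unmatched counter.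
import Mathlib
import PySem

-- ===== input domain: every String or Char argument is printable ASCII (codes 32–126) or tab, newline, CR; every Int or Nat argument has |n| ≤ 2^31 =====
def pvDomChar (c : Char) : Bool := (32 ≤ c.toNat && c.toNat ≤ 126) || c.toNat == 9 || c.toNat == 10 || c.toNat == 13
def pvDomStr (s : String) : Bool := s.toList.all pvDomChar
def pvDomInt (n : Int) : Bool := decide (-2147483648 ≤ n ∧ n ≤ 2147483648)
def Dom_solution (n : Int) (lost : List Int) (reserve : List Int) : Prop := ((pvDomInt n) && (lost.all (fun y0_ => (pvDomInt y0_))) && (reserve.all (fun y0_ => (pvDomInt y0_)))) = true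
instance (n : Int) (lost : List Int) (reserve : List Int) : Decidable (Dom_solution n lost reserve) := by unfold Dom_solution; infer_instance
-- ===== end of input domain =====

-- B replaces A's per-student set lookups/mutations by a two-pointer merge of the two sorted lists (alternative decomposition, same asymptotic cost).


-- ===== PORT A =====
-- Python's set.remove is on an element known to be present at each call site
-- (the branch condition / the loop invariant guarantees membership), so it is
-- exactly PySem.Set.discard here.
def solution (n : Int) (lost : List Int) (reserve : List Int) : Int :=
  let lostSet : PySem.Set Int := PySem.Set.diff (PySem.Set.ofList lost) (PySem.Set.ofList reserve)
  let reserveSet : PySem.Set Int := PySem.Set.diff (PySem.Set.ofList reserve) (PySem.Set.ofList lost)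
  let final := (PySem.List.sorted lostSet (fun x => x) false).foldl
    (fun st student =>
      if PySem.Set.contains st.2 (student - 1) then
        (PySem.Set.discard st.1 student, PySem.Set.discard st.2 (student - 1))
      else if PySem.Set.contains st.2 (student + 1) then
        (PySem.Set.discard st.1 student, PySem.Set.discard st.2 (student + 1))
      else st)
    (lostSet, reserveSet)
  n - PySem.Set.len final.1

-- ===== PORT B =====
-- The while loop of Source B, state (i, j, unmatched), as structural recursion on
-- the two list suffixes L[i:], R[j:] with the same accumulator.
def goTP : List Int → List Int → Int → Int
  | [], _, acc => acc
  | _ :: L, [], acc => goTP L [] (acc + 1)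
  | s :: L, r :: R, acc =>
    if r < s - 1 then goTP (s :: L) R acc
    else if r ≤ s + 1 then goTP L R acc
    else goTP L (r :: R) (acc + 1)
  termination_by L R _ => L.length + R.length

def solution_alt (n : Int) (lost : List Int) (reserve : List Int) : Int :=
  let L := PySem.List.sorted (PySem.Set.diff (PySem.Set.ofList lost) (PySem.Set.ofList reserve)) (fun x => x) false
  let R := PySem.List.sorted (PySem.Set.diff (PySem.Set.ofList reserve) (PySem.Set.ofList lost)) (fun x => x) false
  n - goTP L R 0

-- ===== PRECONDITION & SPEC =====
def Spec_solution (n : Int) (lost : List Int) (reserve : List Int) (out : Int) : Prop := out = solution_alt n lost reserve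
instance (n : Int) (lost : List Int) (reserve : List Int) (out : Int) : Decidable (Spec_solution n lost reserve out) := by unfold Spec_solution; infer_instance

-- ===== CLAIM (what is proved, stated in full; the proofs are below) =====
def Claim_equal_solution : Prop := ∀ (n : Int) (lost : List Int) (reserve : List Int), Dom_solution n lost reserve → Spec_solution n lost reserve (solution n lost reserve)

-- ===== LEMMAS AND PROOFS =====

-- Matched count of A's greedy loop: how many lost students get a jersey, as a
-- function of the (still unprocessed) sorted lost list and the reserve set.
def countA : List Int → List Int → Int
  | [], _ => 0
  | s :: L, S =>
    if PySem.Set.contains S (s - 1) then 1 + countA L (PySem.Set.discard S (s - 1))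
    else if PySem.Set.contains S (s + 1) then 1 + countA L (PySem.Set.discard S (s + 1))
    else countA L S

theorem pairwise_lt_of_le_nodup (l : List Int) (h : l.Pairwise (· ≤ ·)) (hn : l.Nodup) :
    l.Pairwise (· < ·) := by
  induction l with
  | nil => exact List.Pairwise.nil
  | cons a t ih =>
    rcases h with _ | ⟨ha, ht⟩
    rcases hn with _ | ⟨hna, hnt⟩
    exact List.Pairwise.cons (fun x hx => lt_of_le_of_ne (ha x hx) (by simpa using hna x hx)) (ih ht hnt)

theorem mem_discard_int {x y : Int} {s : List Int} :
    x ∈ PySem.Set.discard s y ↔ x ∈ s ∧ x ≠ y := by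
  simp [PySem.Set.discard, List.mem_filter]

theorem length_discard_int {s : List Int} {x : Int} (hn : s.Nodup) (hx : x ∈ s) :
    ((PySem.Set.discard s x).length : Int) = (s.length : Int) - 1 := by
  simp only [PySem.Set.discard]
  have h1 : List.count x s = 1 := List.count_eq_one_of_mem hn hx
  have h2 := (List.filter_append_perm (fun y => !y == x) s).length_eq
  simp only [List.length_append, Bool.not_not] at h2
  have h3 : (List.filter (fun y => y == x) s).length = List.count x s := by
    simp [List.count_eq_length_filter, BEq.comm]
  omega

theorem countA_perm (L : List Int) : ∀ (S S' : List Int), S.Perm S' → countA L S = countA L S' := by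
  induction L with
  | nil => intro S S' _; rfl
  | cons s L ih =>
    intro S S' hp
    have hc : ∀ v : Int, PySem.Set.contains S v = PySem.Set.contains S' v := by
      intro v
      rw [Bool.eq_iff_iff]
      simp [PySem.Set.contains, hp.mem_iff]
    simp only [countA, hc]
    split_ifs with h1 h2
    · exact congrArg (fun z => 1 + z) (ih _ _ (hp.filter _))
    · exact congrArg (fun z => 1 + z) (ih _ _ (hp.filter _))
    · exact ih _ _ hp

theorem countA_drop_small (r : Int) : ∀ (L S : List Int), (∀ s ∈ L, r + 1 < s) →
    countA L (r :: S) = countA L S := by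
  intro L
  induction L with
  | nil => intro S _; rfl
  | cons s L ih =>
    intro S hs
    have hr1 : r + 1 < s := hs s (by simp)
    have e1 : ((s - 1 : Int) == r) = false := by simp; omega
    have e2 : ((s + 1 : Int) == r) = false := by simp; omega
    have hc : ∀ v : Int, v ≠ r → PySem.Set.contains (r :: S) v = PySem.Set.contains S v := by
      intro v hv
      simp [PySem.Set.contains, hv]
    have hd : ∀ v : Int, v ≠ r →
        PySem.Set.discard (r :: S) v = r :: PySem.Set.discard S v := by
      intro v hv
      simp [PySem.Set.discard, (by simp [hv.symm] : (r == v) = false)]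
    have hv1 : (s - 1 : Int) ≠ r := by omega
    have hv2 : (s + 1 : Int) ≠ r := by omega
    have htail : ∀ x ∈ L, r + 1 < x := fun x hx => hs x (by simp [hx])
    simp only [countA, hc _ hv1, hc _ hv2]
    split_ifs with h1 h2
    · rw [hd _ hv1, ih _ htail]
    · rw [hd _ hv2, ih _ htail]
    · exact ih _ htail

theorem goTP_eq (L R : List Int) (acc : Int) : L.Pairwise (· < ·) → R.Pairwise (· < ·) →
    (∀ x ∈ L, x ∉ R) → goTP L R acc = acc + (L.length : Int) - countA L R := by
  induction L, R, acc using goTP.induct with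
  | case1 => intro _ _ _; simp [goTP, countA]
  | case2 s L acc ih =>
    intro hL _ _
    rcases hL with _ | ⟨_, hLt⟩
    have := ih hLt List.Pairwise.nil (by simp)
    simp only [goTP, countA, PySem.Set.contains, List.contains, List.elem_nil, List.length_cons] at *
    push_cast
    omega
  | case3 s L r R acc hlt ih =>
    intro hL hR hdis
    rcases hL with _ | ⟨hLhead, hLt⟩
    have hsmall : ∀ x ∈ s :: L, r + 1 < x := by
      intro x hx
      rcases List.mem_cons.mp hx with h | h
      · omega
      · have := hLhead x h; omega
    rcases hR with _ | ⟨_, hRt⟩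
    have hdis' : ∀ x ∈ s :: L, x ∉ R := fun x hx hxR => hdis x hx (by simp [hxR])
    rw [show goTP (s :: L) (r :: R) acc = goTP (s :: L) R acc by rw [goTP]; simp [hlt],
        ih (List.Pairwise.cons hLhead hLt) hRt hdis',
        countA_drop_small r (s :: L) R hsmall]
  | case4 s L r R acc hnlt hle ih =>
    intro hL hR hdis
    rcases hL with _ | ⟨hLhead, hLt⟩
    rcases hR with _ | ⟨hRhead, hRt⟩
    have hne : r ≠ s := fun h => hdis s (by simp) (by simp [h.symm])
    -- r = s - 1 or r = s + 1
    have hcase : r = s - 1 ∨ r = s + 1 := by omega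
    have hdis' : ∀ x ∈ L, x ∉ R := fun x hx hxR => hdis x (by simp [hx]) (by simp [hxR])
    have hRnotmem : ∀ v : Int, v ≤ r → (v ∈ R → False) := fun v hv hmem => by
      have := hRhead v hmem; omega
    have hdiscard_head : PySem.Set.discard (r :: R) r = R := by
      have : List.filter (fun y => !y == r) R = R :=
        List.filter_eq_self.mpr (fun a ha => by
          have := hRhead a ha; simp; omega)
      simp [PySem.Set.discard, this]
    have hih := ih hLt hRt hdis'
    rw [show goTP (s :: L) (r :: R) acc = goTP L R acc by rw [goTP]; simp [hnlt, hle]]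
    rcases hcase with hcr | hcr
    · subst hcr
      have hc1 : PySem.Set.contains ((s - 1) :: R) (s - 1) = true := by
        simp [PySem.Set.contains]
      rw [show countA (s :: L) ((s - 1) :: R) = 1 + countA L R by
            simp only [countA, hc1, if_true, hdiscard_head]]
      rw [hih]
      simp only [List.length_cons]
      push_cast
      omega
    · subst hcr
      have hc1 : PySem.Set.contains ((s + 1) :: R) (s - 1) = false := by
        rw [Bool.eq_false_iff]
        intro h
        simp only [PySem.Set.contains, List.contains_iff_mem, List.mem_cons] at h
        rcases h with h | h
        · omega
        · exact hRnotmem (s - 1) (by omega) h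
      have hc2 : PySem.Set.contains ((s + 1) :: R) (s + 1) = true := by
        simp [PySem.Set.contains]
      rw [show countA (s :: L) ((s + 1) :: R) = 1 + countA L R by
            simp only [countA, hc1, hc2, if_true, Bool.false_eq_true, if_false, hdiscard_head]]
      rw [hih]
      simp only [List.length_cons]
      push_cast
      omega
  | case5 s L r R acc hnlt hnle ih =>
    intro hL hR hdis
    rcases hL with _ | ⟨hLhead, hLt⟩
    rcases hR with _ | ⟨hRhead, hRt⟩
    have hc1 : PySem.Set.contains (r :: R) (s - 1) = false := by
      rw [Bool.eq_false_iff]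
      intro h
      simp only [PySem.Set.contains, List.contains_iff_mem, List.mem_cons] at h
      rcases h with h | h
      · omega
      · have := hRhead _ h; omega
    have hc2 : PySem.Set.contains (r :: R) (s + 1) = false := by
      rw [Bool.eq_false_iff]
      intro h
      simp only [PySem.Set.contains, List.contains_iff_mem, List.mem_cons] at h
      rcases h with h | h
      · omega
      · have := hRhead _ h; omega
    have hdis' : ∀ x ∈ L, x ∉ r :: R := fun x hx => hdis x (by simp [hx])
    have hih := ih hLt (List.Pairwise.cons hRhead hRt) hdis'
    rw [show goTP (s :: L) (r :: R) acc = goTP L (r :: R) (acc + 1) by rw [goTP]; simp [hnlt, hnle]]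
    simp only [countA, hc1, hc2, Bool.false_eq_true, if_false]
    rw [hih]
    simp only [List.length_cons]
    push_cast
    omega

-- A's loop: the size of the final lost set is the initial size minus the matched count.
theorem fold_len (L : List Int) : ∀ (ls rs : List Int), L.Nodup → ls.Nodup → (∀ s ∈ L, s ∈ ls) →
    ((L.foldl
      (fun st student =>
        if PySem.Set.contains st.2 (student - 1) then
          (PySem.Set.discard st.1 student, PySem.Set.discard st.2 (student - 1))
        else if PySem.Set.contains st.2 (student + 1) then
          (PySem.Set.discard st.1 student, PySem.Set.discard st.2 (student + 1))
        else st)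
      (ls, rs)).1.length : Int) = (ls.length : Int) - countA L rs := by
  induction L with
  | nil => intro ls rs _ _ _; simp [countA]
  | cons s L ih =>
    intro ls rs hLn hlsn hmem
    rcases hLn with _ | ⟨hsn, hLn⟩
    have hs : s ∈ ls := hmem s (by simp)
    have hmem' : ∀ x ∈ L, x ∈ PySem.Set.discard ls s := by
      intro x hx
      exact mem_discard_int.mpr ⟨hmem x (by simp [hx]), fun h => hsn x hx h.symm⟩
    have hnd : (PySem.Set.discard ls s).Nodup := List.Nodup.filter _ hlsn
    have hlen := length_discard_int hlsn hs
    simp only [List.foldl_cons, countA]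
    split_ifs with h1 h2
    · rw [ih _ _ hLn hnd hmem', hlen]; ring
    · rw [ih _ _ hLn hnd hmem', hlen]; ring
    · exact ih _ _ hLn hlsn (fun x hx => hmem x (by simp [hx]))

theorem nodup_diff (xs ys : List Int) :
    (PySem.Set.diff (PySem.Set.ofList xs) (PySem.Set.ofList ys)).Nodup :=
  List.Nodup.filter _ (PySem.Set.nodup_ofList xs)

theorem mem_diff_int {x : Int} {xs ys : List Int} :
    x ∈ PySem.Set.diff (PySem.Set.ofList xs) (PySem.Set.ofList ys) ↔ x ∈ xs ∧ x ∉ ys := by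
  simp [PySem.Set.diff, List.mem_filter, PySem.Set.contains, PySem.Set.mem_ofList]

-- ===== VERDICT (by name: the statement is the Claim_ definition above) =====
theorem solution_spec : Claim_equal_solution := by
  intro n lost reserve _
  unfold Spec_solution solution solution_alt
  set ls := PySem.Set.diff (PySem.Set.ofList lost) (PySem.Set.ofList reserve) with hls
  set rs := PySem.Set.diff (PySem.Set.ofList reserve) (PySem.Set.ofList lost) with hrs
  set L0 := PySem.List.sorted ls (fun x => x) false with hL0
  set R0 := PySem.List.sorted rs (fun x => x) false with hR0
  have hpermL : L0.Perm ls := PySem.List.sorted_perm ls (fun x => x) false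
  have hpermR : R0.Perm rs := PySem.List.sorted_perm rs (fun x => x) false
  have hlsn : ls.Nodup := nodup_diff lost reserve
  have hrsn : rs.Nodup := nodup_diff reserve lost
  have hL0n : L0.Nodup := hpermL.nodup_iff.mpr hlsn
  have hR0n : R0.Nodup := hpermR.nodup_iff.mpr hrsn
  have hL0lt : L0.Pairwise (· < ·) :=
    pairwise_lt_of_le_nodup L0 (PySem.List.sorted_pairwise ls (fun x => x)) hL0n
  have hR0lt : R0.Pairwise (· < ·) :=
    pairwise_lt_of_le_nodup R0 (PySem.List.sorted_pairwise rs (fun x => x)) hR0n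
  have hdis : ∀ x ∈ L0, x ∉ R0 := by
    intro x hx hxR
    have h1 : x ∈ ls := hpermL.mem_iff.mp hx
    have h2 : x ∈ rs := hpermR.mem_iff.mp hxR
    exact (mem_diff_int.mp h2).2 (mem_diff_int.mp h1).1
  have hfold := fold_len L0 ls rs hL0n hlsn (fun s hs => hpermL.mem_iff.mp hs)
  have hgo := goTP_eq L0 R0 0 hL0lt hR0lt hdis
  have hcp : countA L0 rs = countA L0 R0 := countA_perm L0 rs R0 hpermR.symm
  have hlen : L0.length = ls.length := hpermL.length_eq
  simp only [PySem.Set.len]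
  rw [hfold, hcp, hgo, hlen]
  ring
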